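-- pv_equiv track=rewrite | github.com/NormanTUD/lettermixer | lettermixer.py | render_colored
-- ===== SOURCE A (Python) =====
-- def render_colored(s, frozen, word_id):
--     # color locked words (and their frozen spaces) green, others default
--     GREEN = '\033[92m'
--     RESET = '\033[0m'
--     out = []
--     n = len(s)
--     i = 0
--     while i < n:
--         if frozen[i]:
--             wid = word_id[i]
--             # gather contiguous region with same word_id (or frozen but None)
--             j = i
--             while j < n and frozen[j] and word_id[j] == wid:
--                 j += 1
--             segment = s[i:j]
--             out.append(GREEN + segment + RESET)
--             i = j
--         else:
--             out.append(s[i])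
--             i += 1
--     return ''.join(out)
-- ===== SOURCE B (Python) =====
-- def render_colored(s, frozen, word_id):
--     # single pass: emit GREEN/RESET at run boundaries instead of slicing regions
--     GREEN = '\033[92m'
--     RESET = '\033[0m'
--     n = len(s)
--
--     def key(i):
--         return (word_id[i],) if frozen[i] else None
--
--     parts = []
--     for i in range(n):
--         k = key(i)
--         if k is None:
--             parts.append(s[i])
--         else:
--             if i == 0 or key(i - 1) != k:
--                 parts.append(GREEN)
--             parts.append(s[i])
--             if i == n - 1 or key(i + 1) != k:
--                 parts.append(RESET)
--     return ''.join(parts)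
-- ===== Notes on version B (the rewrite author's own statement) =====
-- stated objective: alternative
-- what changed: B makes a single per-character pass that emits GREEN before the first char of a frozen run and RESET after its last char (detected by comparing neighbour keys), instead of A's nested while-loops that scan out each run and slice the string.
import Mathlib
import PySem

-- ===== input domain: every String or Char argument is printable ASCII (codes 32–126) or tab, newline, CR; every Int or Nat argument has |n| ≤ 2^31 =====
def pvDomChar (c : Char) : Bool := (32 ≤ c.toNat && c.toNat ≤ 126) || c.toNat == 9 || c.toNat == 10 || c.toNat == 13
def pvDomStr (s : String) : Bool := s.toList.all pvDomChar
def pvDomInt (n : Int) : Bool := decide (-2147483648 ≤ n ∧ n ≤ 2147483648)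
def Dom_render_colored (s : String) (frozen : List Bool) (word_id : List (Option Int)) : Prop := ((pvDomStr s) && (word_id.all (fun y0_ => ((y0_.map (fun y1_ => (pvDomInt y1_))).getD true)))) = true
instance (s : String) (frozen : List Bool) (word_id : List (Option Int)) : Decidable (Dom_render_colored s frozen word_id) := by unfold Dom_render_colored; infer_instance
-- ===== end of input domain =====

-- B replaces A's nested run-scanning while-loops by a single per-character pass that
-- emits GREEN/RESET exactly at run boundaries (alternative decomposition, same cost).

-- ===== PORT A =====
-- GREEN = '\033[92m', RESET = '\033[0m' as character lists (strings are handled on the List Char side)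
def pvGreen : List Char := ['\x1b', '[', '9', '2', 'm']
def pvReset : List Char := ['\x1b', '[', '0', 'm']

-- inner while loop of A: advance j while j < n and frozen[j] and word_id[j] == wid
def rcScan (frozen : List Bool) (word_id : List (Option Int)) (n : Nat) (wid : Option Int) (j : Nat) : Nat :=
  if h : j < n ∧ PySem.List.pyGetD frozen (j : Int) false = true ∧ PySem.List.pyGetD word_id (j : Int) none = wid then
    rcScan frozen word_id n wid (j + 1)
  else j
termination_by n - j
decreasing_by omega

-- facts the outer loop's termination needs (the port cites rcScan_gt in decreasing_by)
theorem rcScan_ge (frozen : List Bool) (word_id : List (Option Int)) (n : Nat) (wid : Option Int) (j : Nat) :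
    j ≤ rcScan frozen word_id n wid j := by
  fun_induction rcScan with
  | case1 j h ih => omega
  | case2 j h => omega

theorem rcScan_gt (frozen : List Bool) (word_id : List (Option Int)) (n : Nat) (i : Nat)
    (h : i < n) (hf : PySem.List.pyGetD frozen (i : Int) false = true) :
    i < rcScan frozen word_id n (PySem.List.pyGetD word_id (i : Int) none) i := by
  rw [rcScan]
  simp only [h, hf, and_self, true_and, dif_pos]
  have := rcScan_ge frozen word_id n (PySem.List.pyGetD word_id (i : Int) none) (i + 1)
  omega

-- outer while loop of A over index i, accumulating out
def rcGo (cs : List Char) (frozen : List Bool) (word_id : List (Option Int)) (n : Nat) (i : Nat) (out : List (List Char)) : List (List Char) :=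
  if h : i < n then
    if hf : PySem.List.pyGetD frozen (i : Int) false = true then
      let wid := PySem.List.pyGetD word_id (i : Int) none
      let j := rcScan frozen word_id n wid i
      let segment := PySem.List.slice cs (some (i : Int)) (some (j : Int))
      rcGo cs frozen word_id n j (out ++ [pvGreen ++ segment ++ pvReset])
    else
      rcGo cs frozen word_id n (i + 1) (out ++ [[PySem.List.pyGetD cs (i : Int) ' ']])
  else out
termination_by n - i
decreasing_by
  · have := rcScan_gt frozen word_id n i h hf; omega
  · omega

def render_colored (s : String) (frozen : List Bool) (word_id : List (Option Int)) : String :=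
  let n := s.toList.length
  String.ofList ((rcGo s.toList frozen word_id n 0 []).flatten)   -- ''.join(out)

-- ===== PORT B =====
-- key(i) = (word_id[i],) if frozen[i] else None  (tuple-or-None modelled as Option (Option Int))
def keyB (frozen : List Bool) (word_id : List (Option Int)) (i : Int) : Option (Option Int) :=
  if PySem.List.pyGetD frozen i false then some (PySem.List.pyGetD word_id i none) else none

-- the parts appended by one iteration of B's for-loop at index i
def bPartsAt (cs : List Char) (frozen : List Bool) (word_id : List (Option Int)) (n : Int) (i : Int) : List (List Char) :=
  match keyB frozen word_id i with
  | none => [[PySem.List.pyGetD cs i ' ']]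
  | some _ =>
    (if i = 0 ∨ keyB frozen word_id (i - 1) ≠ keyB frozen word_id i then [pvGreen] else [])
      ++ [[PySem.List.pyGetD cs i ' ']]
      ++ (if i = n - 1 ∨ keyB frozen word_id (i + 1) ≠ keyB frozen word_id i then [pvReset] else [])

def render_colored_alt (s : String) (frozen : List Bool) (word_id : List (Option Int)) : String :=
  let cs := s.toList
  let n := cs.length
  let parts := (PySem.List.pyRange 0 (n : Int) 1).foldl
    (fun parts i => parts ++ bPartsAt cs frozen word_id (n : Int) i) []
  String.ofList parts.flatten   -- ''.join(parts)

-- ===== PRECONDITION & SPEC =====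
-- Pre_ excludes exactly the inputs where Python A raises IndexError: frozen must cover every
-- position of s, and word_id every position where frozen is True.
def Pre_render_colored (s : String) (frozen : List Bool) (word_id : List (Option Int)) : Prop :=
  s.toList.length ≤ frozen.length ∧
    ∀ i < s.toList.length, frozen.getD i false = true → i < word_id.length
instance (s : String) (frozen : List Bool) (word_id : List (Option Int)) : Decidable (Pre_render_colored s frozen word_id) := by unfold Pre_render_colored; infer_instance

def pvWitness_render_colored : String × List Bool × List (Option Int) := ("ab", [true, false], [some 1, none])

def Spec_render_colored (s : String) (frozen : List Bool) (word_id : List (Option Int)) (out : String) : Prop := out = render_colored_alt s frozen word_id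
instance (s : String) (frozen : List Bool) (word_id : List (Option Int)) (out : String) : Decidable (Spec_render_colored s frozen word_id out) := by unfold Spec_render_colored; infer_instance

-- ===== CLAIM (what is proved, stated in full; the proofs are below) =====
def Claim_equal_render_colored : Prop := ∀ (s : String) (frozen : List Bool) (word_id : List (Option Int)), Dom_render_colored s frozen word_id → Pre_render_colored s frozen word_id → Spec_render_colored s frozen word_id (render_colored s frozen word_id)

-- ===== LEMMAS AND PROOFS =====

-- Nat-indexed key and the per-character piece of output both programs produce at index i
def keyN (frozen : List Bool) (word_id : List (Option Int)) (i : Nat) : Option (Option Int) :=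
  if frozen.getD i false then some (word_id.getD i none) else none

def pieceN (cs : List Char) (frozen : List Bool) (word_id : List (Option Int)) (n i : Nat) : List Char :=
  match keyN frozen word_id i with
  | none => [cs.getD i ' ']
  | some _ =>
    (if i = 0 ∨ keyN frozen word_id (i - 1) ≠ keyN frozen word_id i then pvGreen else [])
      ++ [cs.getD i ' ']
      ++ (if i = n - 1 ∨ keyN frozen word_id (i + 1) ≠ keyN frozen word_id i then pvReset else [])

theorem keyB_natCast (frozen : List Bool) (word_id : List (Option Int)) (i : Nat) :
    keyB frozen word_id (i : Int) = keyN frozen word_id i := by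
  simp [keyB, keyN]

theorem flatten_flatMap {α : Type} (l : List α) (g : α → List (List Char)) :
    (l.flatMap g).flatten = l.flatMap (fun i => (g i).flatten) := by
  induction l with
  | nil => simp
  | cons a t ih => simp [ih]

theorem bPartsAt_flatten (cs : List Char) (frozen : List Bool) (word_id : List (Option Int)) (n i : Nat) (hi : i < n) :
    (bPartsAt cs frozen word_id (n : Int) (i : Int)).flatten = pieceN cs frozen word_id n i := by
  cases hk : keyN frozen word_id i with
  | none =>
    simp [bPartsAt, pieceN, keyB_natCast, hk]
  | some v =>
    have h1 : ((i : Int) - 1) = ((i - 1 : Nat) : Int) ∨ i = 0 := by omega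
    have hstart : ((i : Int) = 0 ∨ keyB frozen word_id ((i : Int) - 1) ≠ some v) ↔
        (i = 0 ∨ keyN frozen word_id (i - 1) ≠ some v) := by
      rcases h1 with h1 | h1
      · rw [h1, keyB_natCast]
        constructor
        · rintro (h | h)
          · exact Or.inl (by omega)
          · exact Or.inr h
        · rintro (h | h)
          · exact Or.inl (by omega)
          · exact Or.inr h
      · subst h1; simp
    have h2 : ((i : Int) + 1) = ((i + 1 : Nat) : Int) := by omega
    have hend : ((i : Int) = (n : Int) - 1 ∨ keyB frozen word_id ((i : Int) + 1) ≠ some v) ↔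
        (i = n - 1 ∨ keyN frozen word_id (i + 1) ≠ some v) := by
      rw [h2, keyB_natCast]
      constructor
      · rintro (h | h)
        · exact Or.inl (by omega)
        · exact Or.inr h
      · rintro (h | h)
        · exact Or.inl (by omega)
        · exact Or.inr h
    simp only [bPartsAt, pieceN, keyB_natCast, hk]
    rw [if_congr hstart rfl rfl, if_congr hend rfl rfl]
    split_ifs <;> simp

theorem alt_chars (s : String) (frozen : List Bool) (word_id : List (Option Int)) :
    render_colored_alt s frozen word_id =
      String.ofList ((List.range s.toList.length).flatMap (pieceN s.toList frozen word_id s.toList.length)) := by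
  show String.ofList (((PySem.List.pyRange 0 ((s.toList.length : Nat) : Int) 1).foldl
    (fun parts i => parts ++ bPartsAt s.toList frozen word_id ((s.toList.length : Nat) : Int) i) []).flatten) = _
  rw [PySem.List.foldl_append_eq_flatMap]
  rw [List.nil_append, flatten_flatMap]
  rw [PySem.List.pyRange_zero_natCast, List.flatMap_map]
  congr 1
  apply List.flatMap_congr
  intro i hi
  exact bPartsAt_flatten _ _ _ _ _ (List.mem_range.mp hi)

theorem rcScan_facts (frozen : List Bool) (word_id : List (Option Int)) (n : Nat) (wid : Option Int) (j : Nat) :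
    (∀ t, j ≤ t → t < rcScan frozen word_id n wid j →
        t < n ∧ frozen.getD t false = true ∧ word_id.getD t none = wid) ∧
      ¬(rcScan frozen word_id n wid j < n ∧
          frozen.getD (rcScan frozen word_id n wid j) false = true ∧
          word_id.getD (rcScan frozen word_id n wid j) none = wid) := by
  fun_induction rcScan with
  | case1 j h ih =>
    refine ⟨?_, ih.2⟩
    intro t ht hts
    rcases Nat.eq_or_lt_of_le ht with h' | h'
    · subst h'
      simp only [PySem.List.pyGetD_natCast] at h
      exact ⟨h.1, by simpa using h.2.1, by simpa using h.2.2⟩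
    · exact ih.1 t h' hts
  | case2 j h =>
    refine ⟨fun t ht hts => absurd hts (by omega), ?_⟩
    simpa using h

theorem mapGetD_range' (cs : List Char) : ∀ (k i : Nat), i + k ≤ cs.length →
    (List.range' i k).map (fun t => cs.getD t ' ') = (cs.drop i).take k := by
  intro k
  induction k with
  | zero => simp
  | succ k ih =>
    intro i hik
    have hi : i < cs.length := by omega
    rw [List.range'_succ, List.map_cons, List.drop_eq_getElem_cons hi, List.take_succ_cons,
      ih (i + 1) (by omega)]
    simp [List.getElem?_eq_getElem hi]

theorem run_concat (cs : List Char) (frozen : List Bool) (word_id : List (Option Int)) (n : Nat) (wid : Option Int) :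
    ∀ (k i : Nat), i + (k + 1) ≤ n →
      (∀ t, i ≤ t → t < i + (k + 1) → keyN frozen word_id t = some wid) →
      (i + (k + 1) = n ∨ keyN frozen word_id (i + (k + 1)) ≠ some wid) →
      (List.range' i (k + 1)).flatMap (pieceN cs frozen word_id n) =
        (if i = 0 ∨ keyN frozen word_id (i - 1) ≠ some wid then pvGreen else [])
          ++ (List.range' i (k + 1)).map (fun t => cs.getD t ' ') ++ pvReset := by
  intro k
  induction k with
  | zero =>
    intro i hik hrun hend
    have hk : keyN frozen word_id i = some wid := hrun i (Nat.le_refl i) (by omega)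
    have hendT : i = n - 1 ∨ ¬ keyN frozen word_id (i + 1) = some wid := by
      rcases hend with h | h
      · exact Or.inl (by omega)
      · exact Or.inr (by simpa using h)
    simp only [Nat.zero_add, List.range'_one, List.flatMap_cons, List.flatMap_nil, List.append_nil,
      List.map_cons, List.map_nil, pieceN, hk, if_pos hendT]
  | succ k ih =>
    intro i hik hrun hend
    have hk : keyN frozen word_id i = some wid := hrun i (Nat.le_refl i) (by omega)
    have hk1 : keyN frozen word_id (i + 1) = some wid := hrun (i + 1) (by omega) (by omega)
    have hendF : ¬ (i = n - 1 ∨ ¬ keyN frozen word_id (i + 1) = some wid) := by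
      push_neg
      exact ⟨by omega, hk1⟩
    have hih := ih (i + 1) (by omega) (fun t ht hts => hrun t (by omega) (by omega))
      (by
        have h' : i + 1 + (k + 1) = i + (k + 1 + 1) := by omega
        rw [h']
        exact hend)
    rw [if_neg (by simp [hk])] at hih
    rw [List.range'_succ, List.flatMap_cons, hih]
    simp only [pieceN, hk, if_neg hendF, List.map_cons, List.append_nil]
    simp

def InvA (frozen : List Bool) (word_id : List (Option Int)) (n i : Nat) : Prop :=
  n ≤ i ∨ i = 0 ∨ keyN frozen word_id (i - 1) = none ∨ keyN frozen word_id (i - 1) ≠ keyN frozen word_id i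

theorem rcGo_flatten (cs : List Char) (frozen : List Bool) (word_id : List (Option Int)) :
    ∀ (K i : Nat) (out : List (List Char)), cs.length - i ≤ K → InvA frozen word_id cs.length i →
      (rcGo cs frozen word_id cs.length i out).flatten =
        out.flatten ++ (List.range' i (cs.length - i)).flatMap (pieceN cs frozen word_id cs.length) := by
  intro K
  induction K with
  | zero =>
    intro i out hK _hInv
    rw [rcGo, dif_neg (by omega)]
    have h0 : cs.length - i = 0 := by omega
    simp [h0]
  | succ K ih =>
    intro i out hK hInv
    by_cases h : i < cs.length
    · by_cases hf : PySem.List.pyGetD frozen (i : Int) false = true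
      · -- frozen branch: A consumes the whole run [i, j)
        rw [rcGo, dif_pos h, dif_pos hf]
        have hfN : frozen.getD i false = true := by simpa using hf
        set wid := PySem.List.pyGetD word_id (i : Int) none with hwid_def
        set j := rcScan frozen word_id cs.length wid i with hj_def
        have hgt : i < j := rcScan_gt frozen word_id cs.length i h hf
        obtain ⟨hrun, hstop⟩ := rcScan_facts frozen word_id cs.length wid i
        have hjn : j ≤ cs.length := by
          have := hrun (j - 1) (by omega) (by omega)
          omega
        have hkey : ∀ t, i ≤ t → t < j → keyN frozen word_id t = some wid := by
          intro t ht hts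
          obtain ⟨_, hft, hwt⟩ := hrun t ht hts
          unfold keyN
          rw [hft, if_pos rfl, hwt]
        have hki : keyN frozen word_id i = some wid := hkey i (Nat.le_refl i) hgt
        -- after the run either the string ends or the key changes
        have hendK : j = cs.length ∨ keyN frozen word_id j ≠ some wid := by
          by_cases hjl : j < cs.length
          · right
            intro hkj
            simp only [keyN] at hkj
            by_cases hfj : frozen.getD j false = true
            · rw [if_pos hfj] at hkj
              exact hstop ⟨hjl, hfj, Option.some.inj hkj⟩
            · rw [if_neg hfj] at hkj
              simp at hkj
          · left; omega
        have hihj := ih j (out ++ [pvGreen ++ PySem.List.slice cs (some (i : Int)) (some (j : Int)) ++ pvReset]) (by omega)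
          (by
            unfold InvA
            by_cases hjl : j < cs.length
            · right; right
              have hprev : keyN frozen word_id (j - 1) = some wid := hkey (j - 1) (by omega) (by omega)
              rcases hendK with h' | h'
              · omega
              · right
                rw [hprev]
                exact fun hc => h' hc.symm
            · left; omega)
        rw [hihj]
        have hsplit : List.range' i (cs.length - i) = List.range' i (j - i) ++ List.range' j (cs.length - j) := by
          have h1 : List.range' i (j - i) ++ List.range' (i + (j - i)) (cs.length - j) = List.range' i ((j - i) + (cs.length - j)) := List.range'_append_1
          rw [show i + (j - i) = j from by omega] at h1
          rw [h1]
          congr 1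
          omega
        have hrc := run_concat cs frozen word_id cs.length wid (j - i - 1) i (by omega)
          (by intro t ht hts; exact hkey t ht (by omega))
          (by
            have h2 : i + (j - i - 1 + 1) = j := by omega
            rw [h2]
            exact hendK)
        have h3 : j - i - 1 + 1 = j - i := by omega
        rw [h3] at hrc
        have hstart : (i = 0 ∨ keyN frozen word_id (i - 1) ≠ some wid) := by
          unfold InvA at hInv
          rcases hInv with h' | h' | h' | h'
          · omega
          · exact Or.inl h'
          · exact Or.inr (by simp [h'])
          · exact Or.inr (by rw [← hki]; exact h')
        rw [if_pos hstart] at hrc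
        rw [hsplit, List.flatMap_append, hrc,
          mapGetD_range' cs (j - i) i (by omega),
          PySem.List.slice_natCast cs i j]
        simp
      · -- non-frozen branch: A emits the single character s[i]
        rw [rcGo, dif_pos h, dif_neg hf]
        have hfN : frozen.getD i false = false := by
          simp only [PySem.List.pyGetD_natCast, Bool.not_eq_true] at hf
          exact hf
        have hkN : keyN frozen word_id i = none := by
          unfold keyN
          rw [hfN, if_neg Bool.false_ne_true]
        have hihi := ih (i + 1) (out ++ [[PySem.List.pyGetD cs (i : Int) ' ']]) (by omega)
          (by unfold InvA; right; right; left; simpa using hkN)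
        rw [hihi]
        have hlen : cs.length - i = (cs.length - (i + 1)) + 1 := by omega
        rw [hlen, List.range'_succ, List.flatMap_cons]
        have hpiece : pieceN cs frozen word_id cs.length i = [cs.getD i ' '] := by
          simp [pieceN, hkN]
        rw [hpiece]
        simp
    · rw [rcGo, dif_neg h]
      have h0 : cs.length - i = 0 := by omega
      simp [h0]

-- ===== VERDICT (by name: the statement is the Claim_ definition above) =====
theorem render_colored_spec : Claim_equal_render_colored := by
  intro s frozen word_id _hDom _hPre
  unfold Spec_render_colored
  rw [alt_chars]
  show String.ofList ((rcGo s.toList frozen word_id s.toList.length 0 []).flatten) = _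
  rw [rcGo_flatten s.toList frozen word_id s.toList.length 0 [] (by omega) (Or.inr (Or.inl rfl))]
  simp [List.range_eq_range']
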